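-- pv_equiv track=rewrite | github.com/Tomer-Tau/CryoEM-CommunityDetection | MRA/Edges_Histogram.py | partition_edges_by_communities
-- ===== SOURCE A (Python) =====
-- def partition_edges_by_communities(edges_list, community_labels):
--     intra_edges_weights = []
--     inter_edges_weights = []
--
--     for edge in edges_list:
--         # if edge connects nodes from same community
--         if [True for community in community_labels if (edge[0][0] in community and edge[0][1] in community)]:
--             intra_edges_weights.append(edge[1])
--         else:
--             inter_edges_weights.append(edge[1])
--
--     return intra_edges_weights, inter_edges_weights
-- ===== SOURCE B (Python) =====
-- def partition_edges_by_communities(edges_list, community_labels):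
--     # Build an index of intra-community edges first, then classify in one ordered pass.
--     intra_indices = set()
--     for community in community_labels:
--         for i, edge in enumerate(edges_list):
--             if edge[0][0] in community and edge[0][1] in community:
--                 intra_indices.add(i)
--     intra_edges_weights = []
--     inter_edges_weights = []
--     for i, edge in enumerate(edges_list):
--         if i in intra_indices:
--             intra_edges_weights.append(edge[1])
--         else:
--             inter_edges_weights.append(edge[1])
--     return intra_edges_weights, inter_edges_weights
-- ===== Notes on version B (the rewrite author's own statement) =====
-- stated objective: alternative
-- what changed: Instead of re-scanning every community per edge via a list comprehension, B first builds a set of intra-edge indices by looping over communities, then classifies edges in a single ordered pass over enumerate(edges_list).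
import Mathlib
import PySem

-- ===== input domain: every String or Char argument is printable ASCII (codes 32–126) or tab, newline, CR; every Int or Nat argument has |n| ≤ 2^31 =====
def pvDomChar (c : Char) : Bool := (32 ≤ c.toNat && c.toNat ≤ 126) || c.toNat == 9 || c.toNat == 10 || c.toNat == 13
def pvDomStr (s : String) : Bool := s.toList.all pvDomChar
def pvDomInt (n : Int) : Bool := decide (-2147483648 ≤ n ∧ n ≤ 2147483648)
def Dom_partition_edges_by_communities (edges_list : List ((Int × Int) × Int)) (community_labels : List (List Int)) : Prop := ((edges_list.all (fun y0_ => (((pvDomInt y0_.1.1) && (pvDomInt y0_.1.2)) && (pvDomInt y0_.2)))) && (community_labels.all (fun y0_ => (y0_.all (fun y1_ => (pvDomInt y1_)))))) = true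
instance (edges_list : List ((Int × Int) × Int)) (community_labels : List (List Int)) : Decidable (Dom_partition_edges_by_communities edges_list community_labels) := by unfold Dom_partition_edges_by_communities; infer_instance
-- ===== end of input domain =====

-- B builds a set of intra-edge indices community-by-community first and then classifies
-- the edges in one ordered enumerate pass, instead of A's per-edge comprehension over all
-- communities; same return value, similar cost (objective: alternative decomposition).

-- ===== PORT A =====
def partition_edges_by_communities (edges_list : List ((Int × Int) × Int)) (community_labels : List (List Int)) : List Int × List Int :=
  edges_list.foldl (fun st edge =>
    -- [True for community in community_labels if (edge[0][0] in community and edge[0][1] in community)]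
    if ((community_labels.filter (fun community => community.contains edge.1.1 && community.contains edge.1.2)).map (fun _ => true)) ≠ [] then
      (st.1 ++ [edge.2], st.2)
    else
      (st.1, st.2 ++ [edge.2])) ([], [])

-- ===== PORT B =====
def pvIntraIndices (edges_list : List ((Int × Int) × Int)) (community_labels : List (List Int)) : PySem.Set Int :=
  community_labels.foldl (fun s community =>
    (PySem.List.enumerate edges_list).foldl (fun s p =>
      if community.contains p.2.1.1 && community.contains p.2.1.2 then PySem.Set.add s p.1 else s) s)
    PySem.Set.empty

def partition_edges_by_communities_alt (edges_list : List ((Int × Int) × Int)) (community_labels : List (List Int)) : List Int × List Int :=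
  let intra_indices := pvIntraIndices edges_list community_labels
  (PySem.List.enumerate edges_list).foldl (fun st p =>
    if PySem.Set.contains intra_indices p.1 then
      (st.1 ++ [p.2.2], st.2)
    else
      (st.1, st.2 ++ [p.2.2])) ([], [])

-- ===== PRECONDITION & SPEC =====
def Spec_partition_edges_by_communities (edges_list : List ((Int × Int) × Int)) (community_labels : List (List Int)) (out : List Int × List Int) : Prop := out = partition_edges_by_communities_alt edges_list community_labels
instance (edges_list : List ((Int × Int) × Int)) (community_labels : List (List Int)) (out : List Int × List Int) : Decidable (Spec_partition_edges_by_communities edges_list community_labels out) := by unfold Spec_partition_edges_by_communities; infer_instance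

-- ===== CLAIM (what is proved, stated in full; the proofs are below) =====
def Claim_equal_partition_edges_by_communities : Prop := ∀ (edges_list : List ((Int × Int) × Int)) (community_labels : List (List Int)), Dom_partition_edges_by_communities edges_list community_labels → Spec_partition_edges_by_communities edges_list community_labels (partition_edges_by_communities edges_list community_labels)

-- ===== LEMMAS AND PROOFS =====

def pvPred (community : List Int) (e : (Int × Int) × Int) : Bool :=
  community.contains e.1.1 && community.contains e.1.2

lemma mem_inner_fold (c : List Int) (L : List (Int × ((Int × Int) × Int))) (s : PySem.Set Int) (j : Int) :
    j ∈ L.foldl (fun s p => if pvPred c p.2 then PySem.Set.add s p.1 else s) s ↔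
      j ∈ s ∨ ∃ p ∈ L, p.1 = j ∧ pvPred c p.2 = true := by
  induction L generalizing s with
  | nil => simp
  | cons p L ih =>
    simp only [List.foldl_cons]
    by_cases h : pvPred c p.2 = true
    · rw [h, if_pos rfl, ih]
      simp [PySem.Set.mem_add, h]
      tauto
    · rw [if_neg (by simpa using h), ih]
      simp only [List.mem_cons]
      constructor
      · rintro (hs | ⟨q, hq, rfl, hp⟩)
        · exact Or.inl hs
        · exact Or.inr ⟨q, Or.inr hq, rfl, hp⟩
      · rintro (hs | ⟨q, (rfl | hq), rfl, hp⟩)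
        · exact Or.inl hs
        · exact absurd hp h
        · exact Or.inr ⟨q, hq, rfl, hp⟩

lemma mem_outer_fold (edges_list : List ((Int × Int) × Int)) (cl : List (List Int)) (s : PySem.Set Int) (j : Int) :
    j ∈ cl.foldl (fun s community =>
        (PySem.List.enumerate edges_list).foldl (fun s p =>
          if pvPred community p.2 then PySem.Set.add s p.1 else s) s) s ↔
      j ∈ s ∨ ∃ c ∈ cl, ∃ p ∈ PySem.List.enumerate edges_list, p.1 = j ∧ pvPred c p.2 = true := by
  induction cl generalizing s with
  | nil => simp
  | cons c cl ih =>
    simp only [List.foldl_cons, ih, mem_inner_fold, List.mem_cons]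
    constructor
    · rintro (⟨hs | ⟨p, hp, rfl, hq⟩⟩ | ⟨c', hc', hp⟩)
      · exact Or.inl hs
      · exact Or.inr ⟨c, Or.inl rfl, p, hp, rfl, hq⟩
      · exact Or.inr ⟨c', Or.inr hc', hp⟩
    · rintro (hs | ⟨c', (rfl | hc'), hp⟩)
      · exact Or.inl (Or.inl hs)
      · exact Or.inl (Or.inr hp)
      · exact Or.inr ⟨c', hc', hp⟩

lemma mem_pvIntraIndices (edges_list : List ((Int × Int) × Int)) (cl : List (List Int)) (k : Nat) (hk : k < edges_list.length) :
    (k : Int) ∈ pvIntraIndices edges_list cl ↔ ∃ c ∈ cl, pvPred c edges_list[k] = true := by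
  unfold pvIntraIndices
  have : (fun (s : PySem.Set Int) (community : List Int) =>
      (PySem.List.enumerate edges_list).foldl (fun s p =>
        if community.contains p.2.1.1 && community.contains p.2.1.2 then PySem.Set.add s p.1 else s) s) =
      fun s community => (PySem.List.enumerate edges_list).foldl (fun s p =>
        if pvPred community p.2 then PySem.Set.add s p.1 else s) s := rfl
  rw [this, mem_outer_fold]
  simp only [PySem.Set.empty, List.not_mem_nil, false_or]
  constructor
  · rintro ⟨c, hc, p, hp, hj, hq⟩
    rw [PySem.List.mem_enumerate_iff] at hp
    obtain ⟨k', hk', rfl⟩ := hp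
    simp only [zero_add] at hj
    have : k' = k := by exact_mod_cast hj
    subst this
    exact ⟨c, hc, hq⟩
  · rintro ⟨c, hc, hq⟩
    refine ⟨c, hc, ((k : Int), edges_list[k]), ?_, rfl, hq⟩
    rw [PySem.List.mem_enumerate_iff]
    exact ⟨k, hk, by simp⟩

lemma condA_iff (cl : List (List Int)) (e : (Int × Int) × Int) :
    ((cl.filter (fun community => community.contains e.1.1 && community.contains e.1.2)).map (fun _ => true)) ≠ [] ↔
      ∃ c ∈ cl, pvPred c e = true := by
  rw [Ne, List.map_eq_nil_iff, List.filter_eq_nil_iff]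
  push Not
  simp [pvPred]


lemma foldl_enumerate_snd {α β : Type} (L : List α) (g : β → α → β) (init : β) :
    (PySem.List.enumerate L).foldl (fun st p => g st p.2) init = L.foldl g init := by
  conv_rhs => rw [← PySem.List.map_snd_enumerate (xs := L) (s := 0)]
  rw [List.foldl_map]

-- ===== VERDICT (by name: the statement is the Claim_ definition above) =====
theorem partition_edges_by_communities_spec : Claim_equal_partition_edges_by_communities := by
  intro edges_list cl _
  show partition_edges_by_communities edges_list cl = partition_edges_by_communities_alt edges_list cl
  unfold partition_edges_by_communities partition_edges_by_communities_alt
  -- rewrite B's enumerate fold into a fold over the edges themselves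
  rw [show (PySem.List.enumerate edges_list).foldl
        (fun (st : List Int × List Int) p =>
          if PySem.Set.contains (pvIntraIndices edges_list cl) p.1 then (st.1 ++ [p.2.2], st.2)
          else (st.1, st.2 ++ [p.2.2])) ([], []) =
      (PySem.List.enumerate edges_list).foldl
        (fun (st : List Int × List Int) p =>
          if ((cl.filter (fun community => community.contains p.2.1.1 && community.contains p.2.1.2)).map (fun _ => true)) ≠ [] then (st.1 ++ [p.2.2], st.2)
          else (st.1, st.2 ++ [p.2.2])) ([], []) from ?_]
  · exact (foldl_enumerate_snd edges_list
      (fun (st : List Int × List Int) (e : (Int × Int) × Int) =>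
        if ((cl.filter (fun community => community.contains e.1.1 && community.contains e.1.2)).map (fun _ => true)) ≠ [] then (st.1 ++ [e.2], st.2)
        else (st.1, st.2 ++ [e.2])) ([], [])).symm
  · apply PySem.List.foldl_congr_mem
    intro st p hp
    rw [PySem.List.mem_enumerate_iff] at hp
    obtain ⟨k, hk, rfl⟩ := hp
    simp only [zero_add]
    have hcond : PySem.Set.contains (pvIntraIndices edges_list cl) (k : Int) = true ↔
        ((cl.filter (fun community => community.contains (edges_list[k]).1.1 && community.contains (edges_list[k]).1.2)).map (fun _ => true)) ≠ [] := by
      rw [PySem.Set.contains_iff, mem_pvIntraIndices edges_list cl k hk, condA_iff]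
    by_cases h : PySem.Set.contains (pvIntraIndices edges_list cl) (k : Int) = true
    · rw [if_pos h, if_pos (hcond.mp h)]
    · rw [if_neg h, if_neg (fun hc => h (hcond.mpr hc))]
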